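-- pv_equiv track=rewrite | github.com/km-cs-linnben/CS162 | parenthesis.py | trim_char
-- ===== SOURCE A (Python) =====
-- def trim_char(text):
--     # get rid of the non-"(" on the left hand side.
--     for char in text:
--         if char == ")":
--             break
--         if char != "(":
--             char_index = text.index(char)
--             text = text[char_index+1:]
--         else:
--             break
--
--      # get rid of the non-")" on the left hand side.
--     for char in text[::-1]:
--         if char == "(":
--             break
--         if char != ")":
--             text = text[:-1]
--             # char_index = text.index(char)
--             # text = text[:char_index+1]
--         else:
--             break
--     return text
-- ===== SOURCE B (Python) =====
-- import re
--
-- def trim_char(text):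
--     # strip the trailing run of non-paren characters, then the leading run
--     text = re.sub(r'[^()]*\Z', '', text)
--     return re.sub(r'^[^()]*', '', text)
-- ===== Notes on version B (the rewrite author's own statement) =====
-- stated objective: idiomatic
-- what changed: Replaces the two index-and-reslice removal loops by two anchored regex substitutions that delete the trailing and leading runs of non-parenthesis characters in one step each.
import Mathlib
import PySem

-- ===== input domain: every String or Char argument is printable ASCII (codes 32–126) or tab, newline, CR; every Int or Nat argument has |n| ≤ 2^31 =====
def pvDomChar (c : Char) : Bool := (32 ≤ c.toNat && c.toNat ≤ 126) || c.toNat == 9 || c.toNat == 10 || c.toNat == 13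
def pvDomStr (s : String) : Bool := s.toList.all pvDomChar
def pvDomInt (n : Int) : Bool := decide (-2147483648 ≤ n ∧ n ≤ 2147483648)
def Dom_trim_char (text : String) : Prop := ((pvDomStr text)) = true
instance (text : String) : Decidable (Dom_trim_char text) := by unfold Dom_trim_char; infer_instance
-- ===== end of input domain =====

-- B replaces A's quadratic index-and-reslice removal loops by deleting the trailing,
-- then leading, run of non-parenthesis characters in one step each (regex subs in Python).


-- ===== PORT A =====
-- first for-loop: iterate over a snapshot of text, slicing text after the first occurrence
-- of each non-'(' char; break on '(' or ')'.
def trimAloop1 : List Char → List Char → List Char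
  | [], text => text
  | c :: rest, text =>
    if c = ')' then text
    else if c ≠ '(' then
      match PySem.List.index? text c with
      | some i => trimAloop1 rest (PySem.List.slice text (some ((i : Int) + 1)) none)
      | none => text   -- unreachable (the scanned char is text's first char; Python never raises here)
    else text

-- second for-loop: iterate over text[::-1], dropping text[:-1]; break on '(' or ')'.
def trimAloop2 : List Char → List Char → List Char
  | [], text => text
  | c :: rest, text =>
    if c = '(' then text
    else if c ≠ ')' then trimAloop2 rest (PySem.List.slice text none (some (-1)))
    else text

def trim_char (text : String) : String :=
  let t1 := trimAloop1 text.toList text.toList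
  String.ofList (trimAloop2 t1.reverse t1)

-- ===== PORT B =====
def pvNonParen (c : Char) : Bool := c ≠ '(' && c ≠ ')'

def trim_char_alt (text : String) : String :=
  -- re.sub(r'[^()]*\Z', '', text): delete the trailing run of non-paren chars
  let t1 := (text.toList.reverse.dropWhile pvNonParen).reverse
  -- re.sub(r'^[^()]*', '', t1): delete the leading run of non-paren chars
  String.ofList (t1.dropWhile pvNonParen)

-- ===== PRECONDITION & SPEC =====
def Spec_trim_char (text : String) (out : String) : Prop := out = trim_char_alt text
instance (text : String) (out : String) : Decidable (Spec_trim_char text out) := by unfold Spec_trim_char; infer_instance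

-- ===== CLAIM (what is proved, stated in full; the proofs are below) =====
def Claim_equal_trim_char : Prop := ∀ (text : String), Dom_trim_char text → Spec_trim_char text (trim_char text)

-- ===== LEMMAS AND PROOFS =====

-- A's first loop, started with state = snapshot, is dropWhile of non-paren chars.
theorem trimAloop1_eq (l : List Char) : trimAloop1 l l = l.dropWhile pvNonParen := by
  induction l with
  | nil => simp [trimAloop1]
  | cons c rest ih =>
    by_cases h1 : c = ')'
    · simp [trimAloop1, h1, List.dropWhile, pvNonParen]
    · by_cases h2 : c = '('
      · simp [trimAloop1, h2, List.dropWhile, pvNonParen]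
      · have hidx : PySem.List.index? (c :: rest) c = some 0 := PySem.List.index?_cons_self ..
        have hp : pvNonParen c = true := by simp [pvNonParen, h1, h2]
        have hs : PySem.List.slice (c :: rest) (some (((0:Nat) : Int) + 1)) none = rest := by
          norm_num [PySem.List.slice_from_one]
        rw [List.dropWhile_cons_of_pos hp]
        simp only [trimAloop1, if_neg h1, if_pos h2, hidx, hs, ih]
  
-- A's second loop, started with state = r.reverse and scanning r, strips the trailing run.
theorem trimAloop2_eq (r : List Char) :
    trimAloop2 r r.reverse = (r.dropWhile pvNonParen).reverse := by
  induction r with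
  | nil => simp [trimAloop2]
  | cons c rest ih =>
    by_cases h1 : c = '('
    · simp [trimAloop2, h1, List.dropWhile_cons_of_neg, pvNonParen]
    · by_cases h2 : c = ')'
      · simp [trimAloop2, h2, List.dropWhile_cons_of_neg, pvNonParen]
      · have hp : pvNonParen c = true := by simp [pvNonParen, h1, h2]
        have hs : PySem.List.slice ((c :: rest).reverse) none (some (-1)) = rest.reverse := by
          rw [PySem.List.slice_to_neg_one]; simp
        rw [List.dropWhile_cons_of_pos hp, ← ih]
        simp only [trimAloop2, if_neg h1, if_pos h2, hs]

-- trimming the front then the back equals trimming the back then the front.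
theorem dropWhile_swap (p : Char → Bool) (l : List Char) :
    ((l.dropWhile p).reverse.dropWhile p).reverse
      = ((l.reverse.dropWhile p).reverse).dropWhile p := by
  induction l with
  | nil => simp
  | cons c rest ih =>
    by_cases hc : p c = true
    · rw [List.dropWhile_cons_of_pos hc, List.reverse_cons, List.dropWhile_append]
      by_cases hd : (rest.reverse.dropWhile p).isEmpty
      · rw [if_pos hd]
        have hre : rest.reverse.dropWhile p = [] := by simpa using hd
        rw [ih, hre]
        simp [hc]
      · rw [if_neg hd, ih]
        simp [hc]
    · rw [List.dropWhile_cons_of_neg (by simpa using hc), List.reverse_cons]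
      have hD : (rest.reverse ++ [c]).dropWhile p = rest.reverse.dropWhile p ++ [c] := by
        rw [List.dropWhile_append]
        by_cases hd : (rest.reverse.dropWhile p).isEmpty
        · rw [if_pos hd]
          have hre : rest.reverse.dropWhile p = [] := by simpa using hd
          simp [hre, List.dropWhile_cons_of_neg (by simpa using hc)]
        · rw [if_neg hd]
      rw [hD]
      rw [show (rest.reverse.dropWhile p ++ [c]).reverse = c :: (rest.reverse.dropWhile p).reverse by simp]
      rw [List.dropWhile_cons_of_neg (by simpa using hc)]

-- ===== VERDICT (by name: the statement is the Claim_ definition above) =====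
theorem trim_char_spec : Claim_equal_trim_char := by
  intro text _
  unfold Spec_trim_char trim_char trim_char_alt
  simp only [trimAloop1_eq]
  rw [show trimAloop2 (text.toList.dropWhile pvNonParen).reverse (text.toList.dropWhile pvNonParen)
      = trimAloop2 (text.toList.dropWhile pvNonParen).reverse
          ((text.toList.dropWhile pvNonParen).reverse).reverse by rw [List.reverse_reverse]]
  rw [trimAloop2_eq]
  rw [← dropWhile_swap]
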